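-- pv_equiv track=rewrite | github.com/albizures/labs | palinwords/main.py | is_paliword
-- ===== SOURCE A (Python) =====
-- def is_palindrome(word):
--     length = len(word)
--
--     if length == 0 or length == 1:
--         return True
--
--     offset = 0
--
--     while offset < length // 2:
--         if word[offset] != word[-offset - 1]:
--             return False
--         offset += 1
--
--     return True
--
-- def is_paliword(word):
--     length = len(word)
--     palindromes = []
--
--     index = 1
--     while index < length - 2:
--         offset = 1
--         while offset <= index and offset <= length - index - 1:
--             start = index - offset
--             end = index + offset + 1
--             part = word[start:end]
--             if is_palindrome(part):
--                 palindromes.append(word[start:end])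
--                 break
--             elif (end + 1 < length):
--                 part = word[start:end + 1]
--                 if is_palindrome(part):
--                     palindromes.append(part)
--                     break
--             elif (start - 1 > 0):
--                 part = word[start - 1:end]
--                 if is_palindrome(part):
--                     palindromes.append(part)
--                     break
--
--             offset += 1
--         index += 1
--     return len(palindromes) > 1
-- ===== SOURCE B (Python) =====
-- def is_paliword(word):
--     n = len(word)
--     # precompute palindrome radii at every center (expand-around-center),
--     # then answer each (index, offset) query in O(1); stop as soon as two hit
--     odd = []   # odd[c] = max r with word[c-r:c+r+1] a palindrome (pairs in range)
--     for c in range(n):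
--         r = 0
--         while c - r - 1 >= 0 and c + r + 1 < n and word[c - r - 1] == word[c + r + 1]:
--             r += 1
--         odd.append(r)
--     even = []  # even[c] = max k with word[c-k+1:c+k+1] a palindrome (gap c|c+1)
--     for c in range(n - 1):
--         k = 0
--         while c - k >= 0 and c + k + 1 < n and word[c - k] == word[c + k + 1]:
--             k += 1
--         even.append(k)
--     count = 0
--     for i in range(1, n - 2):
--         for off in range(1, min(i, n - i - 1) + 1):
--             e = i + off + 1
--             if off <= odd[i]:
--                 count += 1
--                 break
--             if e + 1 < n:
--                 if off + 1 <= even[i]: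
--                     count += 1
--                     break
--             elif i - off - 1 > 0:
--                 if off + 1 <= even[i - 1]:
--                     count += 1
--                     break
--         if count >= 2:
--             return True
--     return False
-- ===== Notes on version B (the rewrite author's own statement) =====
-- stated objective: faster
-- what changed: B precomputes expand-around-center palindrome radii for every odd and even center once, answers each (index, offset) query by an O(1) radius comparison instead of A's slice-and-scan palindrome test, and counts hits with an early exit at two instead of accumulating a list of substrings.
import Mathlib
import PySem

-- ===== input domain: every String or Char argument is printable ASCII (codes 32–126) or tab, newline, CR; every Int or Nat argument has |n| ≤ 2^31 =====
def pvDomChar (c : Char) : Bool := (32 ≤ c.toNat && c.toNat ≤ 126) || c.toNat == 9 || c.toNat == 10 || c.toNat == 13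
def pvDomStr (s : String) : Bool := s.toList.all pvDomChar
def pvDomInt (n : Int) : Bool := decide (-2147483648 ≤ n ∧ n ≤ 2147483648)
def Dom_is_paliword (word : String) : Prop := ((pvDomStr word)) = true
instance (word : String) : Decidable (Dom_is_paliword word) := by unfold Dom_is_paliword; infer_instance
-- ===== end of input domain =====

-- B replaces A's per-offset slice-and-scan palindrome tests by precomputed expand-around-center
-- palindrome radii answered in O(1) per query, counting hits with an early exit at two (objective: faster).

-- ===== PORT A =====
-- is_palindrome: two-pointer while loop, word[offset] vs word[-offset-1]
def A_palLoop (w : List Char) : Nat → Nat → Bool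
  | 0, _ => true
  | fuel+1, offset =>
    if offset < w.length / 2 then
      match PySem.List.pyGet? w (offset : Int), PySem.List.pyGet? w (-(offset : Int) - 1) with
      | some a, some b => if a ≠ b then false else A_palLoop w fuel (offset+1)
      | _, _ => false
    else true

def A_isPal (w : List Char) : Bool :=
  if w.length = 0 ∨ w.length = 1 then true else A_palLoop w (w.length / 2) 0

-- inner while loop over offset; returns the palindrome appended at the break (if any)
def A_inner (w : List Char) (n i : Nat) : Nat → Nat → Option (List Char)
  | 0, _ => none
  | fuel+1, off =>
    if (off : Int) ≤ (i : Int) ∧ (off : Int) ≤ (n : Int) - (i : Int) - 1 then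
      let start := i - off
      let e := i + off + 1
      let part := PySem.List.slice w (some (start : Int)) (some (e : Int))
      if A_isPal part then some part
      else if (e : Int) + 1 < (n : Int) then
        let part2 := PySem.List.slice w (some (start : Int)) (some ((e : Int) + 1))
        if A_isPal part2 then some part2 else A_inner w n i fuel (off+1)
      else if (start : Int) - 1 > 0 then
        let part3 := PySem.List.slice w (some ((start : Int) - 1)) (some (e : Int))
        if A_isPal part3 then some part3 else A_inner w n i fuel (off+1)
      else A_inner w n i fuel (off+1)
    else none

-- outer while loop over index, accumulating the palindromes list
def A_outer (w : List Char) (n : Nat) : Nat → Nat → List (List Char) → List (List Char)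
  | 0, _, pals => pals
  | fuel+1, i, pals =>
    if (i : Int) < (n : Int) - 2 then
      match A_inner w n i n 1 with
      | some p => A_outer w n fuel (i+1) (pals ++ [p])
      | none => A_outer w n fuel (i+1) pals
    else pals

def is_paliword (word : String) : Bool :=
  let w := word.toList
  let n := w.length
  decide ((A_outer w n n 1 []).length > 1)

-- ===== PORT B =====
-- expand-around-center step predicates (guards written over Nat; c-j-1 >= 0 becomes j+1 ≤ c)
def oddP (w : List Char) (n c : Nat) (j : Nat) : Bool :=
  decide (j + 1 ≤ c) && decide (c + j + 1 < n) && decide (w.getD (c - j - 1) ' ' = w.getD (c + j + 1) ' ')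

def evenP (w : List Char) (n c : Nat) (j : Nat) : Bool :=
  decide (j ≤ c) && decide (c + j + 1 < n) && decide (w.getD (c - j) ' ' = w.getD (c + j + 1) ' ')

-- the shared 'while matching: r += 1' expansion loop of Source B
def pvExpand (p : Nat → Bool) : Nat → Nat → Nat
  | 0, r => r
  | fuel+1, r => if p r then pvExpand p fuel (r+1) else r

def B_oddList (w : List Char) (n : Nat) : List Nat :=
  (List.range n).foldl (fun acc c => acc ++ [pvExpand (oddP w n c) n 0]) []

def B_evenList (w : List Char) (n : Nat) : List Nat :=
  (List.range (n-1)).foldl (fun acc c => acc ++ [pvExpand (evenP w n c) n 0]) []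

-- inner for-loop over off: O(1) radius comparisons
def B_inner (odd even : List Nat) (n i : Nat) : Nat → Nat → Bool
  | 0, _ => false
  | fuel+1, off =>
    if off ≤ min i (n - i - 1) then
      if off ≤ odd.getD i 0 then true
      else if i + off + 2 < n then
        if off + 1 ≤ even.getD i 0 then true else B_inner odd even n i fuel (off+1)
      else if 0 < i - off - 1 then
        if off + 1 ≤ even.getD (i-1) 0 then true else B_inner odd even n i fuel (off+1)
      else B_inner odd even n i fuel (off+1)
    else false

-- outer for-loop counting hits, early exit at two
def B_outer (odd even : List Nat) (n : Nat) : Nat → Nat → Nat → Bool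
  | 0, _, _ => false
  | fuel+1, i, count =>
    if i < n - 2 then
      let count' := if B_inner odd even n i n 1 then count + 1 else count
      if 2 ≤ count' then true else B_outer odd even n fuel (i+1) count'
    else false

def is_paliword_alt (word : String) : Bool :=
  let w := word.toList
  let n := w.length
  B_outer (B_oddList w n) (B_evenList w n) n n 1 0

-- ===== PRECONDITION & SPEC =====
def Spec_is_paliword (word : String) (out : Bool) : Prop := out = is_paliword_alt word
instance (word : String) (out : Bool) : Decidable (Spec_is_paliword word out) := by unfold Spec_is_paliword; infer_instance

-- ===== CLAIM (what is proved, stated in full; the proofs are below) =====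
def Claim_equal_is_paliword : Prop := ∀ (word : String), Dom_is_paliword word → Spec_is_paliword word (is_paliword word)

-- ===== LEMMAS AND PROOFS =====

theorem pvExpand_le (p : Nat → Bool) (fuel : Nat) : ∀ r, r ≤ pvExpand p fuel r := by
  induction fuel with
  | zero => intro r; simp [pvExpand]
  | succ f ih =>
    intro r
    simp only [pvExpand]
    split
    · exact le_trans (by omega) (ih (r+1))
    · exact le_rfl

theorem pvExpand_matched (p : Nat → Bool) (fuel : Nat) : ∀ r j, r ≤ j →
    j < pvExpand p fuel r → p j = true := by
  induction fuel with
  | zero => intro r j h1 h2; simp [pvExpand] at h2; omega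
  | succ f ih =>
    intro r j h1 h2
    simp only [pvExpand] at h2
    by_cases hp : p r = true
    · rw [if_pos hp] at h2
      rcases Nat.eq_or_lt_of_le h1 with h | h
      · exact h ▸ hp
      · exact ih (r+1) j h h2
    · rw [if_neg hp] at h2; omega

theorem pvExpand_ge (p : Nat → Bool) (fuel : Nat) : ∀ r off, off ≤ fuel + r →
    (∀ j, r ≤ j → j < off → p j = true) → off ≤ pvExpand p fuel r := by
  induction fuel with
  | zero => intro r off h1 _; simp [pvExpand]; omega
  | succ f ih =>
    intro r off h1 h2
    simp only [pvExpand]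
    by_cases hro : off ≤ r
    · split
      · exact le_trans hro (pvExpand_le p f (r+1) |>.trans' (by omega))
      · exact hro
    · have hp : p r = true := h2 r le_rfl (by omega)
      rw [if_pos hp]
      exact ih (r+1) off (by omega) (fun j hj => h2 j (by omega))

theorem pvExpand_ge_iff (p : Nat → Bool) (fuel off : Nat) (hfuel : off ≤ fuel) :
    off ≤ pvExpand p fuel 0 ↔ ∀ j, j < off → p j = true := by
  constructor
  · intro h j hj; exact pvExpand_matched p fuel 0 j (Nat.zero_le j) (by omega)
  · intro h; exact pvExpand_ge p fuel 0 off (by omega) (fun j _ hj => h j hj)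

theorem palLoop_iff (l : List Char) : ∀ (fuel k : Nat), l.length / 2 ≤ k + fuel →
    (A_palLoop l fuel k = true ↔
      ∀ j, k ≤ j → j < l.length / 2 → l.getD j ' ' = l.getD (l.length - 1 - j) ' ') := by
  intro fuel
  induction fuel with
  | zero =>
    intro k hk
    simp only [A_palLoop, true_iff]
    intro j hj1 hj2; omega
  | succ f ih =>
    intro k hk
    simp only [A_palLoop]
    by_cases hlt : k < l.length / 2
    · rw [if_pos hlt]
      have hkL : k < l.length := by omega
      have hkL2 : k + 1 ≤ l.length := by omega
      have hget1 : PySem.List.pyGet? l (k : Int) = some l[k] := by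
        rw [PySem.List.pyGet?_natCast]; exact List.getElem?_eq_getElem hkL
      have hneg : -(k : Int) - 1 = -(((k+1 : Nat)) : Int) := by push_cast; ring
      have hget2 : PySem.List.pyGet? l (-(k : Int) - 1) = some l[l.length - (k+1)] := by
        rw [hneg, PySem.List.pyGet?_neg_natCast l (k+1) (by omega) hkL2]
        exact List.getElem?_eq_getElem (by omega)
      rw [hget1, hget2]
      change (if l[k] ≠ l[l.length - (k+1)] then false else A_palLoop l f (k+1)) = true ↔ _
      by_cases heq : l[k] = l[l.length - (k+1)]
      · rw [if_neg (not_not_intro heq)]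
        rw [ih (k+1) (by omega)]
        constructor
        · intro h j hj1 hj2
          by_cases hjk : j = k
          · subst hjk
            have e : l.length - 1 - j = l.length - (j+1) := by omega
            rw [e, List.getD_eq_getElem _ _ hkL, List.getD_eq_getElem _ _ (by omega : l.length - (j+1) < l.length)]
            exact heq
          · exact h j (by omega) hj2
        · intro h j hj1 hj2; exact h j (by omega) hj2
      · rw [if_pos heq]
        simp only [Bool.false_eq_true, false_iff]
        intro h
        apply heq
        have hh := h k le_rfl hlt
        have e : l.length - 1 - k = l.length - (k+1) := by omega
        rw [e, List.getD_eq_getElem _ _ hkL, List.getD_eq_getElem _ _ (by omega : l.length - (k+1) < l.length)] at hh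
        exact hh
    · rw [if_neg hlt]
      simp only [true_iff]
      intro j hj1 hj2; omega

theorem isPal_iff (l : List Char) :
    A_isPal l = true ↔ ∀ j, j < l.length / 2 → l.getD j ' ' = l.getD (l.length - 1 - j) ' ' := by
  unfold A_isPal
  split
  · rename_i h
    simp only [true_iff]
    intro j hj
    rcases h with h | h <;> rw [h] at hj <;> omega
  · exact (palLoop_iff l (l.length / 2) 0 (by omega)).trans
      ⟨fun h j hj => h j (Nat.zero_le j) hj, fun h j _ hj => h j hj⟩

theorem length_drop_take (w : List Char) (s L : Nat) (h : s + L ≤ w.length) :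
    ((w.drop s).take L).length = L := by
  simp [List.length_take, List.length_drop]; omega

theorem getD_drop_take (w : List Char) (s L j : Nat) (hj : j < L) (h : s + L ≤ w.length) :
    ((w.drop s).take L).getD j ' ' = w.getD (s + j) ' ' := by
  have h1 : j < ((w.drop s).take L).length := by rw [length_drop_take w s L h]; exact hj
  rw [List.getD_eq_getElem _ _ h1, List.getD_eq_getElem _ _ (by omega : s + j < w.length)]
  rw [List.getElem_take, List.getElem_drop]

theorem case1 (w : List Char) (n i off : Nat) (hn : n = w.length)
    (h1 : off ≤ i) (h2 : i + off + 1 ≤ n) :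
    A_isPal (PySem.List.slice w (some ((i - off : Nat) : Int)) (some ((i + off + 1 : Nat) : Int)))
      = decide (off ≤ pvExpand (oddP w n i) n 0) := by
  subst hn
  rw [PySem.List.slice_natCast, (show (i+off+1)-(i-off) = 2*off+1 by omega)]
  have hlen : ((w.drop (i-off)).take (2*off+1)).length = 2*off+1 :=
    length_drop_take _ _ _ (by omega)
  rw [Bool.eq_iff_iff, isPal_iff, decide_eq_true_eq,
    pvExpand_ge_iff _ _ _ (by omega : off ≤ w.length), hlen,
    (show (2*off+1)/2 = off by omega)]
  constructor
  · intro H j hj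
    simp only [oddP, Bool.and_eq_true, decide_eq_true_eq]
    refine ⟨⟨by omega, by omega⟩, ?_⟩
    have H' := H (off-1-j) (by omega)
    rw [(show 2*off+1-1-(off-1-j) = off+1+j by omega),
      getD_drop_take w (i-off) (2*off+1) (off-1-j) (by omega) (by omega),
      getD_drop_take w (i-off) (2*off+1) (off+1+j) (by omega) (by omega),
      (show (i-off)+(off-1-j) = i-j-1 by omega),
      (show (i-off)+(off+1+j) = i+j+1 by omega)] at H'
    exact H'
  · intro H j hj
    have H' := H (off-1-j) (by omega)
    simp only [oddP, Bool.and_eq_true, decide_eq_true_eq] at H'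
    rw [(show 2*off+1-1-j = 2*off-j by omega),
      getD_drop_take w (i-off) (2*off+1) j (by omega) (by omega),
      getD_drop_take w (i-off) (2*off+1) (2*off-j) (by omega) (by omega),
      (show (i-off)+j = i-(off-1-j)-1 by omega),
      (show (i-off)+(2*off-j) = i+(off-1-j)+1 by omega)]
    exact H'.2

theorem case2 (w : List Char) (n i off : Nat) (hn : n = w.length)
    (h1 : off ≤ i) (h2 : i + off + 2 ≤ n) :
    A_isPal (PySem.List.slice w (some ((i - off : Nat) : Int)) (some (((i + off + 1 : Nat) : Int) + 1)))
      = decide (off + 1 ≤ pvExpand (evenP w n i) n 0) := by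
  subst hn
  rw [(show ((i+off+1 : Nat) : Int) + 1 = ((i+off+2 : Nat) : Int) by omega)]
  rw [PySem.List.slice_natCast, (show (i+off+2)-(i-off) = 2*off+2 by omega)]
  have hlen : ((w.drop (i-off)).take (2*off+2)).length = 2*off+2 :=
    length_drop_take _ _ _ (by omega)
  rw [Bool.eq_iff_iff, isPal_iff, decide_eq_true_eq,
    pvExpand_ge_iff _ _ _ (by omega : off + 1 ≤ w.length), hlen,
    (show (2*off+2)/2 = off+1 by omega)]
  constructor
  · intro H j hj
    simp only [evenP, Bool.and_eq_true, decide_eq_true_eq]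
    refine ⟨⟨by omega, by omega⟩, ?_⟩
    have H' := H (off-j) (by omega)
    rw [(show 2*off+2-1-(off-j) = off+1+j by omega),
      getD_drop_take w (i-off) (2*off+2) (off-j) (by omega) (by omega),
      getD_drop_take w (i-off) (2*off+2) (off+1+j) (by omega) (by omega),
      (show (i-off)+(off-j) = i-j by omega),
      (show (i-off)+(off+1+j) = i+j+1 by omega)] at H'
    exact H'
  · intro H j hj
    have H' := H (off-j) (by omega)
    simp only [evenP, Bool.and_eq_true, decide_eq_true_eq] at H'
    rw [(show 2*off+2-1-j = 2*off+1-j by omega),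
      getD_drop_take w (i-off) (2*off+2) j (by omega) (by omega),
      getD_drop_take w (i-off) (2*off+2) (2*off+1-j) (by omega) (by omega),
      (show (i-off)+j = i-(off-j) by omega),
      (show (i-off)+(2*off+1-j) = i+(off-j)+1 by omega)]
    exact H'.2

theorem case3 (w : List Char) (n i off : Nat) (hn : n = w.length)
    (h1 : off + 2 ≤ i) (h2 : i + off + 1 ≤ n) :
    A_isPal (PySem.List.slice w (some (((i - off : Nat) : Int) - 1)) (some ((i + off + 1 : Nat) : Int)))
      = decide (off + 1 ≤ pvExpand (evenP w n (i-1)) n 0) := by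
  subst hn
  rw [(show ((i-off : Nat) : Int) - 1 = ((i-off-1 : Nat) : Int) by omega)]
  rw [PySem.List.slice_natCast, (show (i+off+1)-(i-off-1) = 2*off+2 by omega)]
  have hlen : ((w.drop (i-off-1)).take (2*off+2)).length = 2*off+2 :=
    length_drop_take _ _ _ (by omega)
  rw [Bool.eq_iff_iff, isPal_iff, decide_eq_true_eq,
    pvExpand_ge_iff _ _ _ (by omega : off + 1 ≤ w.length), hlen,
    (show (2*off+2)/2 = off+1 by omega)]
  constructor
  · intro H j hj
    simp only [evenP, Bool.and_eq_true, decide_eq_true_eq]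
    refine ⟨⟨by omega, by omega⟩, ?_⟩
    have H' := H (off-j) (by omega)
    rw [(show 2*off+2-1-(off-j) = off+1+j by omega),
      getD_drop_take w (i-off-1) (2*off+2) (off-j) (by omega) (by omega),
      getD_drop_take w (i-off-1) (2*off+2) (off+1+j) (by omega) (by omega),
      (show (i-off-1)+(off-j) = i-1-j by omega),
      (show (i-off-1)+(off+1+j) = (i-1)+j+1 by omega)] at H'
    exact H'
  · intro H j hj
    have H' := H (off-j) (by omega)
    simp only [evenP, Bool.and_eq_true, decide_eq_true_eq] at H'
    rw [(show 2*off+2-1-j = 2*off+1-j by omega),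
      getD_drop_take w (i-off-1) (2*off+2) j (by omega) (by omega),
      getD_drop_take w (i-off-1) (2*off+2) (2*off+1-j) (by omega) (by omega),
      (show (i-off-1)+j = (i-1)-(off-j) by omega),
      (show (i-off-1)+(2*off+1-j) = (i-1)+(off-j)+1 by omega)]
    exact H'.2

theorem oddList_getD (w : List Char) (n i : Nat) (h : i < n) :
    (B_oddList w n).getD i 0 = pvExpand (oddP w n i) n 0 := by
  unfold B_oddList
  rw [PySem.List.foldl_append_singleton_eq_map (fun c => pvExpand (oddP w n c) n 0), List.nil_append,
    PySem.List.getD_map_range _ _ _ _ h]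

theorem evenList_getD (w : List Char) (n i : Nat) (h : i < n - 1) :
    (B_evenList w n).getD i 0 = pvExpand (evenP w n i) n 0 := by
  unfold B_evenList
  rw [PySem.List.foldl_append_singleton_eq_map (fun c => pvExpand (evenP w n c) n 0), List.nil_append,
    PySem.List.getD_map_range _ _ _ _ h]

theorem inner_eq (w : List Char) (n i : Nat) (hn : n = w.length) (hi : 1 ≤ i) (hin : i + 3 ≤ n) :
    ∀ (fuel off : Nat),
      (A_inner w n i fuel off).isSome = B_inner (B_oddList w n) (B_evenList w n) n i fuel off := by
  intro fuel
  induction fuel with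
  | zero => intro off; simp [A_inner, B_inner]
  | succ f ih =>
    intro off
    simp only [A_inner, B_inner]
    by_cases hg : off ≤ min i (n - i - 1)
    · have hoff1 : off ≤ i := by omega
      have hoff2 : i + off + 1 ≤ n := by omega
      rw [if_pos (show (off:Int) ≤ (i:Int) ∧ (off:Int) ≤ (n:Int)-(i:Int)-1 from by
        constructor <;> omega), if_pos hg]
      rw [case1 w n i off hn hoff1 hoff2, oddList_getD w n i (by omega)]
      by_cases hc1 : off ≤ pvExpand (oddP w n i) n 0
      · rw [if_pos (decide_eq_true hc1), if_pos hc1]; rfl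
      · rw [if_neg (by simpa using hc1), if_neg hc1]
        by_cases hg2 : i + off + 2 < n
        · rw [if_pos (show ((i+off+1 : Nat):Int) + 1 < (n:Int) from by omega), if_pos hg2]
          rw [case2 w n i off hn hoff1 (by omega), evenList_getD w n i (by omega)]
          by_cases hc2 : off + 1 ≤ pvExpand (evenP w n i) n 0
          · rw [if_pos (decide_eq_true hc2), if_pos hc2]; rfl
          · rw [if_neg (by simpa using hc2), if_neg hc2]; exact ih (off+1)
        · rw [if_neg (show ¬(((i+off+1 : Nat):Int) + 1 < (n:Int)) from by omega), if_neg hg2]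
          by_cases hg3 : 0 < i - off - 1
          · rw [if_pos (show ((i-off : Nat):Int) - 1 > 0 from by omega), if_pos hg3]
            rw [case3 w n i off hn (by omega) hoff2, evenList_getD w n (i-1) (by omega)]
            by_cases hc3 : off + 1 ≤ pvExpand (evenP w n (i-1)) n 0
            · rw [if_pos (decide_eq_true hc3), if_pos hc3]; rfl
            · rw [if_neg (by simpa using hc3), if_neg hc3]; exact ih (off+1)
          · rw [if_neg (show ¬(((i-off : Nat):Int) - 1 > 0) from by omega), if_neg hg3]
            exact ih (off+1)
    · rw [if_neg (show ¬((off:Int) ≤ (i:Int) ∧ (off:Int) ≤ (n:Int)-(i:Int)-1) from by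
        rw [not_and_or]; omega), if_neg hg]
      rfl

theorem A_outer_mono (w : List Char) (n : Nat) : ∀ (fuel i : Nat) (pals : List (List Char)),
    pals.length ≤ (A_outer w n fuel i pals).length := by
  intro fuel
  induction fuel with
  | zero => intro i pals; simp [A_outer]
  | succ f ih =>
    intro i pals
    simp only [A_outer]
    split
    · cases hA : A_inner w n i n 1 with
      | some p => exact le_trans (by simp) (ih (i+1) (pals ++ [p]))
      | none => exact ih (i+1) pals
    · exact le_rfl

theorem outer_eq (w : List Char) (n : Nat) (hn : n = w.length) :
    ∀ (fuel i : Nat) (pals : List (List Char)) (count : Nat), 1 ≤ i → count = pals.length →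
      count ≤ 1 →
      decide ((A_outer w n fuel i pals).length > 1)
        = B_outer (B_oddList w n) (B_evenList w n) n fuel i count := by
  intro fuel
  induction fuel with
  | zero =>
    intro i pals count hi hc hc1
    rw [Bool.eq_iff_iff, decide_eq_true_eq]
    simp only [A_outer, B_outer, Bool.false_eq_true, iff_false]
    omega
  | succ f ih =>
    intro i pals count hi hc hc1
    rw [Bool.eq_iff_iff, decide_eq_true_eq]
    simp only [A_outer, B_outer]
    by_cases hg : i < n - 2
    · rw [if_pos (show (i:Int) < (n:Int) - 2 from by omega), if_pos hg]
      have hBinner := (inner_eq w n i hn hi (by omega) n 1).symm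
      cases hA : A_inner w n i n 1 with
      | some p =>
        rw [hA] at hBinner
        simp only [Option.isSome_some] at hBinner
        simp only [hBinner, reduceIte]
        by_cases h2 : 2 ≤ count + 1
        · rw [if_pos h2]
          have hmono := A_outer_mono w n f (i+1) (pals ++ [p])
          simp only [List.length_append, List.length_singleton] at hmono
          constructor
          · intro _; rfl
          · intro _; omega
        · rw [if_neg h2]
          have ih' := ih (i+1) (pals ++ [p]) (count+1) (by omega) (by simp [hc]) (by omega)
          rw [Bool.eq_iff_iff, decide_eq_true_eq] at ih'
          exact ih'
      | none =>
        rw [hA] at hBinner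
        simp only [Option.isSome_none] at hBinner
        simp only [hBinner, Bool.false_eq_true, reduceIte]
        rw [if_neg (show ¬ 2 ≤ count from by omega)]
        have ih' := ih (i+1) pals count (by omega) hc hc1
        rw [Bool.eq_iff_iff, decide_eq_true_eq] at ih'
        exact ih'
    · rw [if_neg (show ¬ ((i:Int) < (n:Int) - 2) from by omega), if_neg hg]
      simp only [Bool.false_eq_true, iff_false]
      omega

-- ===== VERDICT (by name: the statement is the Claim_ definition above) =====
theorem is_paliword_spec : Claim_equal_is_paliword := by
  intro word _
  unfold Spec_is_paliword is_paliword is_paliword_alt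
  exact outer_eq word.toList word.toList.length rfl word.toList.length 1 [] 0 le_rfl rfl (by omega)
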